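-- pv_equiv track=rewrite | github.com/paul17crib/envoy-cli | envoy/squasher.py | find_duplicate_keys
-- ===== SOURCE A (Python) =====
-- from typing import Dict, List, Literal, Tuple
--
-- def find_duplicate_keys(lines: List[str]) -> Dict[str, List[int]]:
--     """Return a mapping of key -> list of line indices where it appears.
--
--     Only keys that appear more than once are included.
--     """
--     seen: Dict[str, List[int]] = {}
--     for idx, line in enumerate(lines):
--         stripped = line.strip()
--         if not stripped or stripped.startswith("#"):
--             continue
--         if "=" not in stripped:
--             continue
--         key = stripped.split("=", 1)[0].strip()
--         seen.setdefault(key, []).append(idx)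
--     return {k: v for k, v in seen.items() if len(v) > 1}
-- ===== SOURCE B (Python) =====
-- def _parse_key(line):
--     s = line.strip()
--     if not s or s.startswith("#") or "=" not in s:
--         return None
--     return s.split("=", 1)[0].strip()
--
--
-- def find_duplicate_keys(lines):
--     """Return a mapping of key -> list of line indices where it appears.
--
--     Only keys that appear more than once are included.
--     """
--     pairs = []
--     for idx, line in enumerate(lines):
--         k = _parse_key(line)
--         if k is not None:
--             pairs.append((k, idx))
--     keys = list(dict.fromkeys(k for k, _ in pairs))
--     groups = {k: [i for k2, i in pairs if k2 == k] for k in keys}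
--     return {k: v for k, v in groups.items() if len(v) > 1}
-- ===== Notes on version B (the rewrite author's own statement) =====
-- stated objective: alternative
-- what changed: Instead of A's single pass that grows a dict via setdefault-append and then filters, B collects the qualifying (key, index) pairs once, dedups the keys in first-occurrence order, and builds each key's index list by a per-key scan over the pairs, keeping only lists longer than one.
import Mathlib
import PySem

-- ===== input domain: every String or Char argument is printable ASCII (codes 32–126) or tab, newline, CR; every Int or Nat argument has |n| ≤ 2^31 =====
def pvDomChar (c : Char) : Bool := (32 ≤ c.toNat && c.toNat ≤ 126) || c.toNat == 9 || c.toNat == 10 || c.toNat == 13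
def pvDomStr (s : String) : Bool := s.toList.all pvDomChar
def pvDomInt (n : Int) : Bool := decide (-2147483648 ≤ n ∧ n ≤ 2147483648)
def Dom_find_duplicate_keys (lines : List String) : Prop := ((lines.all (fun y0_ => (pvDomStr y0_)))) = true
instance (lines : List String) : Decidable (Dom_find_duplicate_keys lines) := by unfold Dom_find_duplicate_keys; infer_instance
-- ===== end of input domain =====

-- B replaces A's incrementally-grown setdefault dict by: collect the (key, idx) pairs once,
-- dedup the keys in first-occurrence order, and build each key's index list by a per-key scan
-- (objective: alternative decomposition, same result; not claimed faster).

-- ===== PORT A =====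
def fdkAStep (d : PySem.Dict String (List Int)) (p : Int × String) : PySem.Dict String (List Int) :=
  let stripped := PySem.Str.strip p.2
  if stripped = "" then d
  else if PySem.Str.startswith stripped "#" then d
  else if PySem.Str.isIn "=" stripped = false then d
  else
    let key := PySem.Str.strip (((PySem.Str.splitMax? stripped "=" 1).getD [stripped]).headD "")
    d.modify key [] (· ++ [p.1])

def find_duplicate_keys (lines : List String) : List (String × List Int) :=
  let seen := (PySem.List.enumerate lines 0).foldl fdkAStep PySem.Dict.empty
  seen.items.filter (fun p => 1 < p.2.length)

-- ===== PORT B =====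
-- helper _parse_key of Source B
def fdkParseKey (line : String) : Option String :=
  let s := PySem.Str.strip line
  if s = "" ∨ PySem.Str.startswith s "#" ∨ PySem.Str.isIn "=" s = false then none
  else some (PySem.Str.strip (((PySem.Str.splitMax? s "=" 1).getD [s]).headD ""))

def fdkPairStep (acc : List (String × Int)) (p : Int × String) : List (String × Int) :=
  match fdkParseKey p.2 with
  | some k => acc ++ [(k, p.1)]
  | none => acc

def find_duplicate_keys_alt (lines : List String) : List (String × List Int) :=
  let pairs := (PySem.List.enumerate lines 0).foldl fdkPairStep []
  let keys := PySem.List.dedup (pairs.map (·.1))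
  let groups := keys.map (fun k => (k, (pairs.filter (fun q => q.1 == k)).map (·.2)))
  groups.filter (fun p => 1 < p.2.length)

-- ===== PRECONDITION & SPEC =====
def Spec_find_duplicate_keys (lines : List String) (out : List (String × List Int)) : Prop := out = find_duplicate_keys_alt lines
instance (lines : List String) (out : List (String × List Int)) : Decidable (Spec_find_duplicate_keys lines out) := by unfold Spec_find_duplicate_keys; infer_instance

-- ===== CLAIM (what is proved, stated in full; the proofs are below) =====
def Claim_equal_find_duplicate_keys : Prop := ∀ (lines : List String), Dom_find_duplicate_keys lines → Spec_find_duplicate_keys lines (find_duplicate_keys lines)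

-- ===== LEMMAS AND PROOFS =====

-- A's loop body is exactly "parse, then group-append" on each enumerated line
theorem fdkAStep_eq (d : PySem.Dict String (List Int)) (p : Int × String) :
    fdkAStep d p = match fdkParseKey p.2 with
      | some k => d.modify k [] (· ++ [p.1])
      | none => d := by
  unfold fdkAStep fdkParseKey
  by_cases h1 : PySem.Str.strip p.2 = "" <;>
    by_cases h2 : PySem.Chars.startswith (PySem.Chars.strip p.2.toList) ['#'] = true <;>
      by_cases h3 : PySem.Chars.isIn ['='] (PySem.Chars.strip p.2.toList) = false <;>
        simp [h1, h2, h3]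

-- B's pair loop is the filterMap of fdkParseKey over the enumeration
theorem fdkPairs_eq (xs : List (Int × String)) (acc : List (String × Int)) :
    xs.foldl fdkPairStep acc =
      acc ++ xs.filterMap (fun p => (fdkParseKey p.2).map (fun k => (k, p.1))) := by
  induction xs generalizing acc with
  | nil => simp
  | cons p xs ih =>
    rw [List.foldl_cons, ih]
    unfold fdkPairStep
    cases h : fdkParseKey p.2 <;> simp [h]

-- A's fold over lines equals the canonical group-append fold over the parsed pairs
theorem fdkFoldA_eq (xs : List (Int × String)) (d : PySem.Dict String (List Int)) :
    xs.foldl fdkAStep d =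
      (xs.filterMap (fun p => (fdkParseKey p.2).map (fun k => (k, p.1)))).foldl
        (fun d q => d.modify q.1 [] (· ++ [q.2])) d := by
  induction xs generalizing d with
  | nil => simp
  | cons p xs ih =>
    rw [List.foldl_cons, ih, fdkAStep_eq]
    cases h : fdkParseKey p.2 <;> simp [h]

-- ===== VERDICT (by name: the statement is the Claim_ definition above) =====
theorem find_duplicate_keys_spec : Claim_equal_find_duplicate_keys := by
  intro lines _
  unfold Spec_find_duplicate_keys
  simp only [find_duplicate_keys, find_duplicate_keys_alt]
  rw [fdkPairs_eq, fdkFoldA_eq, List.nil_append]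
  set pairs := (PySem.List.enumerate lines 0).filterMap
      (fun p => (fdkParseKey p.2).map (fun k => (k, p.1))) with hpairs
  set seen := pairs.foldl (fun d q => d.modify q.1 [] (· ++ [q.2])) PySem.Dict.empty with hseen
  have hnod : seen.keys.Nodup := by
    rw [hseen]
    exact PySem.Dict.nodup_keys_foldl_modify_key pairs (·.1) [] (fun _ q => (· ++ [q.2])) _
      PySem.Dict.nodup_keys_empty
  have hitems : seen.items = seen.keys.map (fun k => (k, seen.getD k [])) :=
    PySem.Dict.items_eq_map_keys seen hnod []
  have hkeys : seen.keys = PySem.List.dedup (pairs.map (·.1)) := by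
    rw [hseen]
    rw [PySem.Dict.keys_foldl_modify_key pairs (·.1) [] (fun _ q => (· ++ [q.2]))]
    simp [PySem.Set.update_nil_left]
  have hgetD : ∀ k, seen.getD k [] = (pairs.filter (fun q => q.1 == k)).map (·.2) := by
    intro k
    rw [hseen, PySem.Dict.getD_foldl_modify_append]
    simp
  rw [hitems, hkeys]
  simp only [hgetD]
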